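-- pv_equiv track=rewrite | github.com/lrs1353281004/Kaggle-KKBOX | feature_engineering.py | lyricist_count
-- ===== SOURCE A (Python) =====
-- def lyricist_count(x):
--     if x == 'no_lyricist':
--         return 0
--     else:
--         s_count=1
--         str_list=['|','/','\\',';','、','+','&' ]
--         for str in str_list :
--             s_count=s_count+x.count(str)
--         return s_count
-- ===== SOURCE B (Python) =====
-- def lyricist_count(x):
--     if x == 'no_lyricist':
--         return 0
--     seps = {'|', '/', '\\', ';', '、', '+', '&'}
--     return 1 + sum(1 for ch in x if ch in seps)
-- ===== Notes on version B (the rewrite author's own statement) =====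
-- stated objective: simpler
-- what changed: Replaces seven separate full-string .count() scans (one per separator) with a single character-by-character pass counting membership in a separator set.
import Mathlib
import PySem

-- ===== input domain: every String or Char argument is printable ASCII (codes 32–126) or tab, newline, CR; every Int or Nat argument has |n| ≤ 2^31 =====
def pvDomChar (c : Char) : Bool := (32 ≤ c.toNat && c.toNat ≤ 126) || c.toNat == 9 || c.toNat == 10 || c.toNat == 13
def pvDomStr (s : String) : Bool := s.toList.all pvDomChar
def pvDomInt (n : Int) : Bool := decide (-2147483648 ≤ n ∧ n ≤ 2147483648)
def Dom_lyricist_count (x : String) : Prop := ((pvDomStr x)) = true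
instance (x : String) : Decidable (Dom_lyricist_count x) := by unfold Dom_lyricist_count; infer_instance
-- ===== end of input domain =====

-- B replaces A's seven separate full-string .count() scans with one single pass over the
-- characters counting membership in a separator set (objective: simpler; same return value).

-- ===== PORT A =====
def lyricist_count (x : String) : Int :=
  if x = "no_lyricist" then 0
  else
    (["|", "/", "\\", ";", "、", "+", "&"] : List String).foldl
      (fun s_count sep => s_count + (PySem.Str.count x sep : Int)) 1

-- ===== PORT B =====
def lyricistSeps : PySem.Set Char := PySem.Set.ofList ['|', '/', '\\', ';', '、', '+', '&']

def lyricist_count_alt (x : String) : Int :=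
  if x = "no_lyricist" then 0
  else 1 + (x.toList.countP (fun ch => PySem.Set.contains lyricistSeps ch) : Int)

-- ===== PRECONDITION & SPEC =====
def Spec_lyricist_count (x : String) (out : Int) : Prop := out = lyricist_count_alt x
instance (x : String) (out : Int) : Decidable (Spec_lyricist_count x out) := by unfold Spec_lyricist_count; infer_instance

-- ===== CLAIM (what is proved, stated in full; the proofs are below) =====
def Claim_equal_lyricist_count : Prop := ∀ (x : String), Dom_lyricist_count x → Spec_lyricist_count x (lyricist_count x)

-- ===== LEMMAS AND PROOFS =====

-- A singleton-substring Python count is a character count.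
theorem go_singleton (c : Char) (l : List Char) (fuel acc : Nat) (h : l.length ≤ fuel) :
    PySem.Chars.count.go [c] fuel l acc = acc + l.count c := by
  induction l generalizing fuel acc with
  | nil => cases fuel <;> simp [PySem.Chars.count.go]
  | cons hd t ih =>
    cases fuel with
    | zero => simp at h
    | succ f =>
      simp only [PySem.Chars.count.go, List.isPrefixOf, List.count_cons]
      by_cases hc : c = hd
      · subst hc
        simp [ih _ _ (by simpa using h)]
        omega
      · simp [hc, Ne.symm hc, ih _ _ (by simpa using h)]

theorem count_singleton (cs : List Char) (c : Char) : PySem.Chars.count cs [c] = cs.count c := by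
  simp [PySem.Chars.count, go_singleton c cs cs.length 0 le_rfl]

-- Counting membership in the separator set in one pass = summing the seven per-character counts.
theorem countP_seps (cs : List Char) :
    cs.countP (fun ch => decide (ch ∈ lyricistSeps))
      = cs.count '|' + cs.count '/' + cs.count '\\' + cs.count ';'
        + cs.count '、' + cs.count '+' + cs.count '&' := by
  induction cs with
  | nil => simp
  | cons c t ih =>
    simp only [List.countP_cons, List.count_cons, ih]
    by_cases h1 : c = '|' <;> by_cases h2 : c = '/' <;> by_cases h3 : c = '\\' <;>
      by_cases h4 : c = ';' <;> by_cases h5 : c = '、' <;> by_cases h6 : c = '+' <;>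
      by_cases h7 : c = '&' <;>
      simp_all [lyricistSeps, PySem.Set.contains, PySem.Set.ofList, PySem.Set.add] <;> omega

-- ===== VERDICT (by name: the statement is the Claim_ definition above) =====
theorem lyricist_count_spec : Claim_equal_lyricist_count := by
  intro x _
  unfold Spec_lyricist_count lyricist_count lyricist_count_alt
  by_cases hx : x = "no_lyricist"
  · simp [hx]
  · simp only [hx, List.foldl]
    simp [PySem.Str.count, count_singleton]
    push_cast [countP_seps]
    ring
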